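-- pv_equiv track=rewrite | github.com/linminhtoo/algorithms | ArraysStrings/camelCase.py | camelMatch
-- ===== SOURCE A (Python) =====
-- def camelMatch(qs, p):
--     def u(s):
--         return [c for c in s if c.isupper()]
--
--     def issup(s, t):
--         for c in s:
--             if c in t:
--                 t = t[t.index(c)+1:]
--             else:
--                 return False
--         return True
--
--     return [u(p) == u(q) and issup(p, q) for q in qs]
-- ===== SOURCE B (Python) =====
-- def camelMatch(qs, p):
--     up = [c for c in p if c.isupper()]
--
--     def ok(q):
--         rest = p
--         for c in q:
--             if rest and c == rest[0]:
--                 rest = rest[1:]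
--         return not rest and up == [c for c in q if c.isupper()]
--
--     return [ok(q) for q in qs]
-- ===== Notes on version B (the rewrite author's own statement) =====
-- stated objective: faster
-- what changed: Replaces the repeated 'c in t' + t.index(c) + slice subsequence test with a single left-to-right pass over each query keeping the unmatched suffix of p, and hoists the uppercase list of p out of the per-query loop.
import Mathlib
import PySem

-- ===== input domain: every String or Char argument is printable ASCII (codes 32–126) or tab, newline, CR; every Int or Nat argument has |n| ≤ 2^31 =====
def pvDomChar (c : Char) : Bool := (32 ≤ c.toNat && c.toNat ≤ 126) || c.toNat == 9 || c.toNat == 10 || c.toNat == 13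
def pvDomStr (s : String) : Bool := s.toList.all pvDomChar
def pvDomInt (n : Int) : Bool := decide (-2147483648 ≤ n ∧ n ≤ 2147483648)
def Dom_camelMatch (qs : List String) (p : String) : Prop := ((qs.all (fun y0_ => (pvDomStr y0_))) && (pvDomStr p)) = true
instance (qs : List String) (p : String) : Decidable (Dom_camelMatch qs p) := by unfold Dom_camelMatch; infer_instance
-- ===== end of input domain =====

-- B replaces A's repeated index+slice subsequence test with a single left-to-right
-- pass (remaining-pattern two pointer) and hoists the uppercase list of p out of the
-- per-query loop; objective: faster (O(m·n) instead of O(m·n²)).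

-- ===== PORT A =====
-- u(s) = [c for c in s if c.isupper()]  (Chars.isupper is exact on the ASCII domain)
def pvUpperA (s : List Char) : List Char := s.filter (fun c => PySem.Chars.isupper c)

-- issup: loop over s, shrinking t by t[t.index(c)+1:].  index(c) is only evaluated
-- under the 'c in t' guard, so the '.getD 0' default is never used.
def pvIssup : List Char → List Char → Bool
  | [], _ => true
  | c :: cs, t =>
    if c ∈ t then
      pvIssup cs (PySem.List.slice t (some (((PySem.List.index? t c).getD 0 : Int) + 1)) none)
    else false

def camelMatch (qs : List String) (p : String) : List Bool :=
  qs.map (fun q => decide (pvUpperA p.toList = pvUpperA q.toList) && pvIssup p.toList q.toList)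

-- ===== PORT B =====
-- one fold over q, carrying the still-unmatched suffix of p
def pvStep (rest : List Char) (c : Char) : List Char :=
  match rest with
  | [] => []
  | r :: rs => if c = r then rs else r :: rs

def camelMatch_alt (qs : List String) (p : String) : List Bool :=
  let up := p.toList.filter (fun c => PySem.Chars.isupper c)
  qs.map (fun q =>
    (q.toList.foldl pvStep p.toList).isEmpty
      && decide (up = q.toList.filter (fun c => PySem.Chars.isupper c)))

-- ===== PRECONDITION & SPEC =====
def Spec_camelMatch (qs : List String) (p : String) (out : List Bool) : Prop := out = camelMatch_alt qs p
instance (qs : List String) (p : String) (out : List Bool) : Decidable (Spec_camelMatch qs p out) := by unfold Spec_camelMatch; infer_instance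

-- ===== CLAIM (what is proved, stated in full; the proofs are below) =====
def Claim_equal_camelMatch : Prop := ∀ (qs : List String) (p : String), Dom_camelMatch qs p → Spec_camelMatch qs p (camelMatch qs p)

-- ===== LEMMAS AND PROOFS =====

theorem pvStep_foldl_nil (t : List Char) : t.foldl pvStep [] = [] := by
  induction t with
  | nil => rfl
  | cons b bs ih => simpa [pvStep] using ih

theorem pvIssup_eq_foldl (t : List Char) :
    ∀ s : List Char, pvIssup s t = (t.foldl pvStep s).isEmpty := by
  induction t with
  | nil =>
    intro s
    cases s with
    | nil => rfl
    | cons c cs => simp [pvIssup]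
  | cons b bs ih =>
    intro s
    cases s with
    | nil =>
      simp [pvIssup, List.foldl_cons, pvStep, pvStep_foldl_nil]
    | cons c cs =>
      by_cases hbc : b = c
      · subst hbc
        have hidx : PySem.List.index? (b :: bs) b = some 0 := PySem.List.index?_cons_self ..
        have hslice : PySem.List.slice (b :: bs) (some (((0 : Nat) : Int) + 1)) none = bs := by
          have : (((0 : Nat) : Int) + 1) = ((1 : Nat) : Int) := by norm_num
          rw [this, PySem.List.slice_from_natCast]; rfl
        simp only [pvIssup, List.mem_cons, true_or, if_true, hidx, Option.getD_some,
          List.foldl_cons, pvStep]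
        rw [hslice]
        exact ih cs
      · have hstep : pvStep (c :: cs) b = c :: cs := by simp [pvStep, hbc]
        rw [List.foldl_cons, hstep, ← ih (c :: cs)]
        by_cases hmem : c ∈ bs
        · obtain ⟨k, hk⟩ := Option.isSome_iff_exists.mp
            ((PySem.List.index?_isSome_iff (xs := bs) (v := c)).mpr hmem)
        -- both sides drop through the first occurrence of c
          have hidx : PySem.List.index? (b :: bs) c = some (k + 1) := by
            rw [PySem.List.index?_cons_of_ne _ hbc, hk]; rfl
          have h1 : PySem.List.slice (b :: bs) (some (((k + 1 : Nat) : Int) + 1)) none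
              = bs.drop (k + 1) := by
            have : (((k + 1 : Nat) : Int) + 1) = ((k + 2 : Nat) : Int) := by push_cast; ring
            rw [this, PySem.List.slice_from_natCast]; rfl
          have h2 : PySem.List.slice bs (some (((k : Nat) : Int) + 1)) none = bs.drop (k + 1) := by
            have : (((k : Nat) : Int) + 1) = ((k + 1 : Nat) : Int) := by push_cast; ring
            rw [this, PySem.List.slice_from_natCast]
          simp only [pvIssup, List.mem_cons, hmem, or_true, if_true, hidx, hk,
            Option.getD_some, h1, h2]
        · have : ¬ c ∈ b :: bs := by simp [Ne.symm hbc, hmem]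
          simp [pvIssup, this, hmem]

theorem camelMatch_entry (p q : String) :
    (decide (pvUpperA p.toList = pvUpperA q.toList) && pvIssup p.toList q.toList)
      = ((q.toList.foldl pvStep p.toList).isEmpty
          && decide (p.toList.filter (fun c => PySem.Chars.isupper c)
              = q.toList.filter (fun c => PySem.Chars.isupper c))) := by
  rw [pvIssup_eq_foldl, Bool.and_comm]
  rfl

-- ===== VERDICT (by name: the statement is the Claim_ definition above) =====
theorem camelMatch_spec : Claim_equal_camelMatch := by
  intro qs p _
  unfold Spec_camelMatch camelMatch camelMatch_alt
  exact List.map_congr_left (fun q _ => camelMatch_entry p q)
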